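-- pv_equiv track=rewrite | github.com/teacherSsamko/TIL | codingtest/2020summer_intern/q2.py | threepow
-- ===== SOURCE A (Python) =====
-- def threepow(n):
--     powlist = []
--     power = 0
--     powlist.append(pow(3, power))
--     while len(powlist) <= n:
--         templist = powlist.copy()
--         biggest = templist.pop()
--         if templist:
--             for i in templist:
--                 new_n = biggest + i
--                 powlist.append(new_n)
--         power += 1
--         powlist.append(pow(3, power))
--
--
--
--     return powlist
-- ===== SOURCE B (Python) =====
-- def threepow(n):
--     L = 1
--     while L <= n:
--         L *= 2
--     return [sum(3 ** j for j in range(k.bit_length()) if (k >> j) & 1)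
--             for k in range(1, L + 1)]
-- ===== Notes on version B (the rewrite author's own statement) =====
-- stated objective: simpler
-- what changed: A grows the list by repeated copy-pop-translate doubling; B computes the target length by doubling a counter and then produces each element directly by a closed form (index k's binary digits read as base-3 coefficients), no list copying or accumulation.
import Mathlib
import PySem

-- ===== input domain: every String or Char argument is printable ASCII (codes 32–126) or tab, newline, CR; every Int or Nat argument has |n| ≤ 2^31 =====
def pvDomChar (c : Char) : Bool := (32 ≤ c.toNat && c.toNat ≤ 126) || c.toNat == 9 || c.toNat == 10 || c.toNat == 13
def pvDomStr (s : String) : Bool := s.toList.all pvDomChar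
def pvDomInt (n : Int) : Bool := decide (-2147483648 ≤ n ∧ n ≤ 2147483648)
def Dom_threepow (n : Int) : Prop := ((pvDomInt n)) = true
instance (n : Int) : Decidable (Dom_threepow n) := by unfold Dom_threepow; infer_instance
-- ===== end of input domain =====

-- B replaces A's copy-pop-and-translate doubling of the list by a closed form per index
-- (index k's binary digits read as base-3 coefficients); objective: simpler.

-- ===== PORT A =====
-- A's while loop; state = (powlist, power); recursion measure n + 1 - len(powlist)
def threepowLoop (n : Int) (powlist : List Int) (power : Nat) : List Int :=
  if h : (powlist.length : Int) ≤ n then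
    -- templist = powlist.copy(); biggest = templist.pop()  (pop of the last element)
    match hp : PySem.List.pop? powlist (-1) with
    | none => powlist   -- unreachable (powlist is never empty; Python would raise IndexError)
    | some (biggest, templist) =>
      -- if templist: for i in templist: powlist.append(biggest + i)
      let powlist' := if templist ≠ [] then powlist ++ templist.map (fun i => biggest + i) else powlist
      -- power += 1; powlist.append(pow(3, power))
      threepowLoop n (powlist' ++ [(3:Int) ^ (power + 1)]) (power + 1)
  else powlist
termination_by (n + 1 - powlist.length).toNat
decreasing_by
  have h2 := PySem.List.length_of_pop?_eq_some powlist hp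
  simp only [List.length_append, List.length_cons, List.length_nil]
  split <;> (try simp only [List.length_append, List.length_map]) <;> omega

def threepow (n : Int) : List Int :=
  -- powlist = []; power = 0; powlist.append(pow(3, power)); while …
  threepowLoop n ([] ++ [(3:Int) ^ (0:Nat)]) 0

-- ===== PORT B =====
-- L = 1; while L <= n: L *= 2   (the '0 < L' conjunct is a termination guard only: L stays ≥ 1)
def altLoopL (n L : Int) : Int :=
  if h : 0 < L ∧ L ≤ n then altLoopL n (2 * L) else L
termination_by (n + 1 - L).toNat
decreasing_by omega

-- k.bit_length()
def pvBitLen : Nat → Nat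
  | 0 => 0
  | k + 1 => pvBitLen ((k + 1) / 2) + 1
decreasing_by omega

-- sum(3 ** j for j in range(k.bit_length()) if (k >> j) & 1)
def pvVal (k : Nat) : Int :=
  (((List.range (pvBitLen k)).filter (fun j => (k >>> j) &&& 1 == 1)).map (fun j => (3:Int) ^ j)).sum

-- [<sum> for k in range(1, L + 1)]
def threepow_alt (n : Int) : List Int :=
  let L := altLoopL n 1
  (PySem.List.pyRange 1 (L + 1) 1).map (fun k => pvVal k.toNat)

-- ===== PRECONDITION & SPEC =====
def Spec_threepow (n : Int) (out : List Int) : Prop := out = threepow_alt n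
instance (n : Int) (out : List Int) : Decidable (Spec_threepow n out) := by unfold Spec_threepow; infer_instance

-- ===== CLAIM (what is proved, stated in full; the proofs are below) =====
def Claim_equal_threepow : Prop := ∀ (n : Int), Dom_threepow n → Spec_threepow n (threepow n)

-- ===== LEMMAS AND PROOFS =====

-- the partial bit-sum used by pvVal, with an arbitrary number m of bits
def pvS (m k : Nat) : Int :=
  (((List.range m).filter (fun j => (k >>> j) &&& 1 == 1)).map (fun j => (3:Int) ^ j)).sum

-- recursive characterisation of the bit-to-base-3 sum
def valR : Nat → Int
  | 0 => 0
  | k + 1 => (if (k + 1) % 2 = 1 then 1 else 0) + 3 * valR ((k + 1) / 2)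
decreasing_by omega

theorem shiftRight_succ_div (k j : Nat) : k >>> (j + 1) = (k / 2) >>> j := by
  rw [Nat.add_comm, Nat.shiftRight_add, Nat.shiftRight_one]

theorem pvS_succ (m k : Nat) :
    pvS (m + 1) k = (if k % 2 = 1 then 1 else 0) + 3 * pvS m (k / 2) := by
  unfold pvS
  rw [List.range_succ_eq_map]
  simp only [List.filter_cons, List.filter_map, List.map_cons, List.map_map,
    Nat.shiftRight_zero, Nat.and_one_is_mod]
  have h2 : List.filter ((fun j => k >>> j % 2 == 1) ∘ Nat.succ) (List.range m)
      = List.filter (fun j => (k / 2) >>> j % 2 == 1) (List.range m) := by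
    apply List.filter_congr
    intro j _
    simp only [Function.comp]
    rw [shiftRight_succ_div]
  rw [h2]
  have h3 : ∀ l : List Nat, (l.map ((fun j => (3:Int) ^ j) ∘ Nat.succ)).sum
      = 3 * (l.map (fun j => (3:Int) ^ j)).sum := by
    intro l
    have hc : ((fun j => (3:Int) ^ j) ∘ Nat.succ) = fun j => 3 * (3:Int) ^ j := by
      funext j; simp [Function.comp, pow_succ, mul_comm]
    rw [hc, List.sum_map_mul_left]
  by_cases hk : k % 2 = 1 <;> simp [hk, h3]

theorem valR_eq (m : Nat) : valR m = (if m % 2 = 1 then 1 else 0) + 3 * valR (m / 2) := by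
  match m with
  | 0 => simp [valR]
  | k + 1 => rw [valR]

theorem pvVal_eq_valR (k : Nat) : pvVal k = valR k := by
  induction k using Nat.strong_induction_on with
  | _ k ih =>
    match k with
    | 0 => simp [pvVal, pvBitLen, pvS, valR]
    | k + 1 =>
      show pvVal (k + 1) = valR (k + 1)
      have hbl : pvBitLen (k + 1) = pvBitLen ((k + 1) / 2) + 1 := by rw [pvBitLen]
      have h1 : pvVal (k + 1) = pvS (pvBitLen (k + 1)) (k + 1) := rfl
      rw [h1, hbl, pvS_succ]
      have h2 : pvS (pvBitLen ((k + 1) / 2)) ((k + 1) / 2) = pvVal ((k + 1) / 2) := rfl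
      rw [h2, ih ((k + 1) / 2) (by omega), ← valR_eq]

theorem valR_two_pow_add (p : Nat) : ∀ k, k < 2 ^ p → valR (2 ^ p + k) = 3 ^ p + valR k := by
  induction p with
  | zero =>
    intro k hk
    interval_cases k
    show valR 1 = 3 ^ 0 + valR 0
    rw [valR_eq 1]
    simp [valR]
  | succ p ih =>
    intro k hk
    have hpow : 2 ^ (p + 1) = 2 * 2 ^ p := by ring
    rw [valR_eq (2 ^ (p + 1) + k)]
    have hmod : (2 ^ (p + 1) + k) % 2 = k % 2 := by omega
    have hdiv : (2 ^ (p + 1) + k) / 2 = 2 ^ p + k / 2 := by omega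
    rw [hmod, hdiv, ih (k / 2) (by omega)]
    rw [valR_eq k]
    ring

theorem pvVal_two_pow_add (p k : Nat) (h : k < 2 ^ p) :
    pvVal (2 ^ p + k) = 3 ^ p + pvVal k := by
  simp [pvVal_eq_valR, valR_two_pow_add p k h]

theorem pvVal_two_pow (p : Nat) : pvVal (2 ^ p) = 3 ^ p := by
  have := pvVal_two_pow_add p 0 (by positivity)
  simpa [pvVal_eq_valR, valR] using this

-- the list [pvVal 1, …, pvVal m]
def W (m : Nat) : List Int := (List.range m).map (fun k => pvVal (k + 1))

theorem W_succ (m : Nat) : W (m + 1) = W m ++ [pvVal (m + 1)] := by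
  simp [W, List.range_succ]

theorem W_length (m : Nat) : (W m).length = m := by simp [W]

-- one doubling step of A, expressed on W
theorem W_step (p : Nat) :
    W (2 ^ (p + 1)) = (W (2 ^ p) ++ ((W (2 ^ p)).dropLast).map (fun i => (3:Int) ^ p + i))
      ++ [(3:Int) ^ (p + 1)] := by
  have hL : 0 < 2 ^ p := Nat.two_pow_pos p
  have hW : W (2 ^ p) = W (2 ^ p - 1) ++ [pvVal (2 ^ p)] := by
    have := W_succ (2 ^ p - 1)
    rw [show 2 ^ p - 1 + 1 = 2 ^ p from by omega] at this
    exact this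
  have hdrop : (W (2 ^ p)).dropLast = W (2 ^ p - 1) := by
    rw [hW, List.dropLast_concat]
  have htail : (List.range (2 ^ p)).map (fun k => pvVal (2 ^ p + k + 1))
      = (W (2 ^ p - 1)).map (fun i => (3:Int) ^ p + i) ++ [(3:Int) ^ (p + 1)] := by
    rw [show (2:Nat) ^ p = (2 ^ p - 1) + 1 from by omega]
    rw [List.range_succ, List.map_append]
    congr 1
    · rw [W, List.map_map]
      apply List.map_congr_left
      intro k hk
      simp only [List.mem_range] at hk
      simp only [Function.comp]
      rw [show 2 ^ p - 1 + 1 + k + 1 = 2 ^ p + (k + 1) from by omega]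
      exact pvVal_two_pow_add p (k + 1) (by omega)
    · simp only [List.map_cons, List.map_nil]
      rw [show 2 ^ p - 1 + 1 + (2 ^ p - 1) + 1 = 2 ^ (p + 1) from by rw [pow_succ]; omega]
      rw [pvVal_two_pow]
  rw [List.append_assoc, hdrop]
  rw [show (2:Nat) ^ (p + 1) = 2 ^ p + 2 ^ p from by ring]
  rw [W, List.range_add, List.map_append, List.map_map]
  rw [show ((fun k => pvVal (k + 1)) ∘ (fun k => 2 ^ p + k)) = fun k => pvVal (2 ^ p + k + 1) from by
    funext k; simp [Function.comp]]
  rw [htail]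
  rfl

-- the two loops run in lock step: A's list at power p is W (2^p), B's counter is 2^p
theorem loop_eq_aux (n : Int) : ∀ (d p : Nat), (n + 1 - (2:Int) ^ p).toNat = d →
    threepowLoop n (W (2 ^ p)) p = W ((altLoopL n ((2:Int) ^ p)).toNat) := by
  intro d
  induction d using Nat.strong_induction_on with
  | _ d ih =>
    intro p hd
    have hcast : ((2 ^ p : Nat) : Int) = (2:Int) ^ p := by push_cast; ring
    have hlen : (((W (2 ^ p)).length : Nat) : Int) = (2:Int) ^ p := by rw [W_length]; exact hcast
    have hpos : (0:Int) < 2 ^ p := by positivity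
    have hW : W (2 ^ p) = W (2 ^ p - 1) ++ [pvVal (2 ^ p)] := by
      have h1 := W_succ (2 ^ p - 1)
      rw [show 2 ^ p - 1 + 1 = 2 ^ p from by have := Nat.two_pow_pos p; omega] at h1
      exact h1
    by_cases h : (2:Int) ^ p ≤ n
    · rw [threepowLoop, hlen, dif_pos h]
      rw [hW, PySem.List.pop?_last]
      simp only []
      have hbranch : (if W (2 ^ p - 1) ≠ [] then (W (2 ^ p - 1) ++ [pvVal (2 ^ p)]) ++ (W (2 ^ p - 1)).map (fun i => pvVal (2 ^ p) + i) else W (2 ^ p - 1) ++ [pvVal (2 ^ p)])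
          = (W (2 ^ p - 1) ++ [pvVal (2 ^ p)]) ++ (W (2 ^ p - 1)).map (fun i => pvVal (2 ^ p) + i) := by
        split
        · rfl
        · rename_i hnil
          simp only [ne_eq, not_not] at hnil
          simp [hnil]
      rw [hbranch, ← hW, pvVal_two_pow]
      have hlist : (W (2 ^ p) ++ (W (2 ^ p - 1)).map (fun i => (3:Int) ^ p + i)) ++ [(3:Int) ^ (p + 1)]
          = W (2 ^ (p + 1)) := by
        rw [W_step p, hW, List.dropLast_concat]
      rw [hlist]
      have h2p : (2:Int) ^ (p + 1) = 2 * 2 ^ p := by ring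
      have hd' : (n + 1 - (2:Int) ^ (p + 1)).toNat < d := by omega
      have hstep : altLoopL n ((2:Int) ^ p) = altLoopL n ((2:Int) ^ (p + 1)) := by
        rw [altLoopL, dif_pos ⟨hpos, h⟩]
        congr 1
        ring
      rw [hstep]
      exact ih _ hd' (p + 1) rfl
    · rw [threepowLoop, hlen, dif_neg h]
      rw [altLoopL, dif_neg (by tauto)]
      rw [← hcast, Int.toNat_natCast]

theorem W_pyRange (L : Int) :
    (PySem.List.pyRange 1 (L + 1) 1).map (fun k => pvVal k.toNat) = W L.toNat := by
  rw [PySem.List.pyRange_one]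
  rw [show (L + 1 - 1).toNat = L.toNat from by omega]
  rw [List.map_map, W]
  apply List.map_congr_left
  intro k hk
  simp only [Function.comp]
  congr 1
  omega

-- ===== VERDICT (by name: the statement is the Claim_ definition above) =====
theorem threepow_spec : Claim_equal_threepow := by
  intro n _
  unfold Spec_threepow threepow threepow_alt
  have h0 : ([] ++ [(3:Int) ^ (0:Nat)]) = W (2 ^ 0) := by
    simp [W, pvVal, pvBitLen, pvS]
  rw [h0, loop_eq_aux n _ 0 rfl, W_pyRange]
  norm_num
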